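-- pv_equiv track=rewrite | github.com/service84-io/ctcode | S84_CTCode_Transpiler_RubyTranspiler_ctcode.py | ConvertCall
-- ===== SOURCE A (Python) =====
-- def Size(input: list) -> int: return len(input)
--
-- def Element(input: list, element: int ) -> any: return input[element]
--
-- def Concat(left: str, right: str) -> str: return left + right
--
-- def ConvertCall(name_chain: 'list[str]',parameters: 'list[str]') -> 'str':
--     result: 'str' = Element(name_chain,0)
--     name_chain_index: 'int' = 1
--     last_name_chain_index: 'int' = Size(name_chain)-1
--     while name_chain_index<Size(name_chain):
--         name_part: 'str' = Element(name_chain,name_chain_index)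
--         result = Concat(result,".")
--         if name_chain_index!=last_name_chain_index:
--             if result=="self.":
--                 result = "@"
--         result = Concat(result,name_part)
--         name_chain_index = name_chain_index+1
--     result = Concat(result,"(")
--     if Size(parameters)>0:
--         result = Concat(result,Element(parameters,0))
--         parameters_index: 'int' = 1
--         while parameters_index<Size(parameters):
--             parameter: 'str' = Element(parameters,parameters_index)
--             result = Concat(result,",")
--             result = Concat(result,parameter)
--             parameters_index = parameters_index+1
--     result = Concat(result,")")
--     return result
-- ===== SOURCE B (Python) =====
-- def ConvertCall(name_chain: 'list[str]', parameters: 'list[str]') -> 'str':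
--     if len(name_chain) >= 3 and name_chain[0] == "self":
--         name = "@" + ".".join(name_chain[1:])
--     else:
--         name = ".".join(name_chain)
--     return name + "(" + ",".join(parameters) + ")"
-- ===== Notes on version B (the rewrite author's own statement) =====
-- stated objective: simpler
-- what changed: Replaces A's two index-driven while-loops that accumulate the string piece by piece (with the 'self.' rewrite checked inside the loop) by one upfront conditional ('@' form iff the chain has >= 3 names and starts with 'self') plus two str.join calls.
import Mathlib
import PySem

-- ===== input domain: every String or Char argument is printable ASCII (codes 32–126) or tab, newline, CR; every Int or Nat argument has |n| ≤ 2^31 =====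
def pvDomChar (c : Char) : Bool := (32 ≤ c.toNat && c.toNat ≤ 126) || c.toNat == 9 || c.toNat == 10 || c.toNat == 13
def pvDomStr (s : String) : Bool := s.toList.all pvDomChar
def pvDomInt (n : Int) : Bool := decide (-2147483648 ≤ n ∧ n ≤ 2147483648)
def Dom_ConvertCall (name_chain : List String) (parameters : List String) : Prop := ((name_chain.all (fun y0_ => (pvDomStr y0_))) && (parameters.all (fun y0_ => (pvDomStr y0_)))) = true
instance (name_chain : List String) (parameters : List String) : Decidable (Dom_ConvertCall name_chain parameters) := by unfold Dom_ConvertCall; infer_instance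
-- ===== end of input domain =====

-- B replaces A's two character-accumulation while-loops with one upfront 'self' conditional plus joins (objective: simpler).

-- ===== PORT A =====
-- the first while-loop: name_chain_index from i upward, with the in-loop 'self.' check
def ConvertCallNameLoop (name_chain : List String) (last : Nat) (i : Nat) (result : String) : String :=
  if h : i < name_chain.length then
    let name_part := name_chain[i]
    let result := result ++ "."
    let result := if i ≠ last ∧ result = "self." then "@" else result
    ConvertCallNameLoop name_chain last (i + 1) (result ++ name_part)
  else result
termination_by name_chain.length - i

-- the second while-loop: parameters_index from i upward
def ConvertCallParamLoop (parameters : List String) (i : Nat) (result : String) : String :=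
  if h : i < parameters.length then
    ConvertCallParamLoop parameters (i + 1) (result ++ "," ++ parameters[i])
  else result
termination_by parameters.length - i

def ConvertCall (name_chain : List String) (parameters : List String) : String :=
  -- Element(name_chain, 0) raises IndexError on an empty chain: excluded by Pre_ (getD is unreachable there)
  let result := (PySem.List.pyGet? name_chain 0).getD ""
  let last := name_chain.length - 1
  let result := ConvertCallNameLoop name_chain last 1 result
  let result := result ++ "("
  let result :=
    if 0 < parameters.length then
      ConvertCallParamLoop parameters 1 (result ++ (PySem.List.pyGet? parameters 0).getD "")
    else result
  result ++ ")"

-- ===== PORT B =====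
def ConvertCall_alt (name_chain : List String) (parameters : List String) : String :=
  let name :=
    if name_chain.length ≥ 3 ∧ name_chain.headD "" = "self" then
      "@" ++ PySem.Str.join "." (name_chain.drop 1)
    else
      PySem.Str.join "." name_chain
  name ++ "(" ++ PySem.Str.join "," parameters ++ ")"

-- ===== PRECONDITION & SPEC =====
-- Pre_ excludes only the empty name chain, on which A raises IndexError at Element(name_chain, 0).
def Pre_ConvertCall (name_chain : List String) (parameters : List String) : Prop := name_chain ≠ []
instance (name_chain : List String) (parameters : List String) : Decidable (Pre_ConvertCall name_chain parameters) := by unfold Pre_ConvertCall; infer_instance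
def pvWitness_ConvertCall : List String × List String := (["self", "obj", "run"], ["x", "y"])

def Spec_ConvertCall (name_chain : List String) (parameters : List String) (out : String) : Prop := out = ConvertCall_alt name_chain parameters
instance (name_chain : List String) (parameters : List String) (out : String) : Decidable (Spec_ConvertCall name_chain parameters out) := by unfold Spec_ConvertCall; infer_instance

-- ===== CLAIM (what is proved, stated in full; the proofs are below) =====
def Claim_equal_ConvertCall : Prop := ∀ (name_chain : List String) (parameters : List String), Dom_ConvertCall name_chain parameters → Pre_ConvertCall name_chain parameters → Spec_ConvertCall name_chain parameters (ConvertCall name_chain parameters)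


-- ===== LEMMAS AND PROOFS =====

theorem strJoin_empty_nil : PySem.Str.join "" [] = "" := by
  rw [← String.toList_inj]; simp [PySem.Str.toList_join, PySem.Chars.join_nil]

theorem strJoin_empty_cons (x : String) (l : List String) :
    PySem.Str.join "" (x :: l) = x ++ PySem.Str.join "" l := by
  rw [← String.toList_inj]
  cases l with
  | nil => simp [PySem.Str.toList_join, PySem.Chars.join_nil, PySem.Chars.join_singleton]
  | cons y ys => simp [PySem.Str.toList_join, PySem.Chars.join_cons_cons]

theorem chars_join_empty_cons (x : List Char) (l : List (List Char)) :
    PySem.Chars.join [] (x :: l) = x ++ PySem.Chars.join [] l := by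
  cases l with
  | nil => simp [PySem.Chars.join_singleton, PySem.Chars.join_nil]
  | cons y ys => rw [PySem.Chars.join_cons_cons]; simp

theorem chars_join_cons (sep a : List Char) (l : List (List Char)) :
    PySem.Chars.join sep (a :: l)
      = a ++ PySem.Chars.join [] (l.map (fun s => sep ++ s)) := by
  induction l generalizing a with
  | nil => simp [PySem.Chars.join_singleton, PySem.Chars.join_nil]
  | cons b rest ih =>
    rw [PySem.Chars.join_cons_cons, ih b, List.map_cons, chars_join_empty_cons]
    simp

theorem join_cons (sep : String) (a : String) (l : List String) :
    PySem.Str.join sep (a :: l) = a ++ PySem.Str.join "" (l.map (fun s => sep ++ s)) := by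
  rw [← String.toList_inj]
  simp only [PySem.Str.toList_join, List.map_cons, chars_join_cons, String.toList_append,
    List.map_map]
  simp [Function.comp_def]

theorem append_dot_eq_self_iff (a : String) : a ++ "." = "self." ↔ a = "self" := by
  constructor
  · intro h
    rw [← String.toList_inj] at h ⊢
    have h' : a.toList ++ ['.'] = ("self" : String).toList ++ ['.'] := by
      simpa using h
    exact List.append_inj_left' h' rfl
  · intro h; rw [h]; decide



theorem paramLoop_plain (parameters : List String) (i : Nat) (r : String) :
    ConvertCallParamLoop parameters i r
      = r ++ PySem.Str.join "" ((parameters.drop i).map (fun s => "," ++ s)) := by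
  induction hk : parameters.length - i generalizing i r with
  | zero =>
    rw [ConvertCallParamLoop, dif_neg (by omega)]
    rw [List.drop_eq_nil_of_le (by omega)]
    simp [strJoin_empty_nil]
  | succ n ih =>
    have hi : i < parameters.length := by omega
    rw [ConvertCallParamLoop, dif_pos hi, ih (i + 1) _ (by omega)]
    rw [List.drop_eq_getElem_cons hi, List.map_cons, strJoin_empty_cons]
    simp [String.append_assoc]

theorem nameLoop_plain (name_chain : List String) (last i : Nat) (r : String)
    (hinv : ('.' ∈ r.toList) ∨ (r.toList.take 1 = ['@'])) :
    ConvertCallNameLoop name_chain last i r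
      = r ++ PySem.Str.join "" ((name_chain.drop i).map (fun s => "." ++ s)) := by
  induction hk : name_chain.length - i generalizing i r with
  | zero =>
    rw [ConvertCallNameLoop, dif_neg (by omega)]
    rw [List.drop_eq_nil_of_le (by omega)]
    simp [strJoin_empty_nil]
  | succ n ih =>
    have hi : i < name_chain.length := by omega
    have hne : ¬ (i ≠ last ∧ r ++ "." = "self.") := by
      rintro ⟨-, h⟩
      rw [append_dot_eq_self_iff] at h
      subst h
      rcases hinv with h | h
      · revert h; decide
      · revert h; decide
    rw [ConvertCallNameLoop, dif_pos hi]
    simp only [if_neg hne]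
    rw [ih (i + 1) _ (by
        left
        rw [String.toList_append, String.toList_append]
        simp) (by omega)]
    rw [List.drop_eq_getElem_cons hi, List.map_cons, strJoin_empty_cons]
    simp [String.append_assoc]

theorem strJoin_nil (sep : String) : PySem.Str.join sep [] = "" := by
  rw [← String.toList_inj]; simp [PySem.Str.toList_join, PySem.Chars.join_nil]

theorem params_part (ps : List String) (pre : String) :
    (if 0 < ps.length then ConvertCallParamLoop ps 1 (pre ++ (PySem.List.pyGet? ps 0).getD "") else pre)
      = pre ++ PySem.Str.join "," ps := by
  cases ps with
  | nil => simp [strJoin_nil]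
  | cons p rest =>
    rw [if_pos (by simp)]
    have hget : (PySem.List.pyGet? (p :: rest) 0).getD "" = p := by
      simp [PySem.List.pyGet?, PySem.List.pyIdx?]
    rw [hget, paramLoop_plain, join_cons]
    simp [String.append_assoc]

-- the name-building loop agrees with B's upfront-conditional name
theorem name_part (name_chain : List String) (h : name_chain ≠ []) :
    ConvertCallNameLoop name_chain (name_chain.length - 1) 1 ((PySem.List.pyGet? name_chain 0).getD "")
      = (if name_chain.length ≥ 3 ∧ name_chain.headD "" = "self" then
          "@" ++ PySem.Str.join "." (name_chain.drop 1)
        else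
          PySem.Str.join "." name_chain) := by
  obtain ⟨a, tl, rfl⟩ : ∃ a tl, name_chain = a :: tl := by
    cases name_chain with
    | nil => exact absurd rfl h
    | cons a tl => exact ⟨a, tl, rfl⟩
  have hget : (PySem.List.pyGet? (a :: tl) 0).getD "" = a := by
    simp [PySem.List.pyGet?, PySem.List.pyIdx?]
  rw [hget]
  cases tl with
  | nil =>
    rw [ConvertCallNameLoop, dif_neg (by simp)]
    rw [if_neg (by rintro ⟨h3, -⟩; simp at h3)]
    rw [← String.toList_inj]
    simp [PySem.Str.toList_join, PySem.Chars.join_singleton]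
  | cons b rest =>
    rw [ConvertCallNameLoop, dif_pos (by simp)]
    simp only [List.getElem_cons_succ, List.getElem_cons_zero]
    cases rest with
    | nil =>
      -- two-name chain: the last-index guard blocks the 'self.' rewrite
      rw [if_neg (by rintro ⟨h1, -⟩; exact h1 (by simp))]
      rw [ConvertCallNameLoop, dif_neg (by simp)]
      rw [if_neg (by rintro ⟨h3, -⟩; simp at h3)]
      rw [join_cons]
      rw [← String.toList_inj]
      simp [PySem.Str.toList_join, PySem.Chars.join_singleton]
    | cons c rest' =>
      have hlast : (1 : Nat) ≠ (a :: b :: c :: rest').length - 1 := by simp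
      by_cases hself : a = "self"
      · subst hself
        rw [if_pos ⟨hlast, by decide⟩]
        rw [nameLoop_plain _ _ _ _ (Or.inr (by simp))]
        rw [if_pos ⟨by simp, by simp⟩]
        rw [List.drop_one, List.tail_cons, join_cons]
        simp [String.append_assoc]
      · rw [if_neg (by
            rintro ⟨-, hd⟩
            exact hself ((append_dot_eq_self_iff a).mp hd))]
        rw [nameLoop_plain _ _ _ _ (Or.inl (by simp))]
        rw [if_neg (by rintro ⟨-, hd⟩; simp at hd; exact hself hd)]
        rw [join_cons]
        simp [strJoin_empty_cons, String.append_assoc]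

-- ===== VERDICT (by name: the statement is the Claim_ definition above) =====
theorem ConvertCall_spec : Claim_equal_ConvertCall := by
  intro name_chain parameters _ hpre
  unfold Spec_ConvertCall
  simp only [ConvertCall, ConvertCall_alt]
  rw [name_part name_chain hpre, params_part]
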